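-- pv_equiv track=rewrite | github.com/wd041216-bit/seo-forge | scripts/seo_forge.py | _validate_jsonld
-- ===== SOURCE A (Python) =====
-- def _validate_jsonld(schema_json: dict) -> list[str]:
--     """Validate a JSON-LD schema object for required fields. Returns list of issues."""
--     issues = []
--     schema_type = schema_json.get("@type", "")
--     if not schema_type:
--         issues.append("Missing @type field")
--         return issues
--
--     if schema_type == "Article":
--         for field in ("headline", "datePublished"):
--             if field not in schema_json:
--                 issues.append(f"Article schema missing required field: {field}")
--     elif schema_type == "FAQPage":
--         if "mainEntity" not in schema_json:
--             issues.append("FAQPage schema missing required field: mainEntity")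
--     elif schema_type == "BreadcrumbList":
--         if "itemListElement" not in schema_json:
--             issues.append(
--                 "BreadcrumbList schema missing required field: itemListElement"
--             )
--
--     if "@context" not in schema_json:
--         issues.append(f"{schema_type} schema missing @context field")
--
--     return issues
-- ===== SOURCE B (Python) =====
-- _REQUIRED = {
--     "Article": ("headline", "datePublished"),
--     "FAQPage": ("mainEntity",),
--     "BreadcrumbList": ("itemListElement",),
-- }
--
-- def _validate_jsonld(schema_json: dict) -> list[str]:
--     """Validate a JSON-LD schema object for required fields. Returns list of issues."""
--     schema_type = schema_json.get("@type", "")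
--     if not schema_type:
--         return ["Missing @type field"]
--     # Pessimistic pass: record every issue the schema COULD have, keyed by field,
--     # then one sweep over the object's keys discharges the satisfied ones.
--     pending = {}
--     for field in _REQUIRED.get(schema_type, ()):
--         pending[field] = f"{schema_type} schema missing required field: {field}"
--     pending["@context"] = f"{schema_type} schema missing @context field"
--     for key in schema_json:
--         pending.pop(key, None)
--     return list(pending.values())
-- ===== Notes on version B (the rewrite author's own statement) =====
-- stated objective: alternative
-- what changed: Inverts the control flow: instead of testing each required field against the object, B first builds a pending-issues dict (worst case: every required field plus @context missing) and then makes one sweep over the object's keys popping satisfied entries, returning the surviving messages.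
import Mathlib
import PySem

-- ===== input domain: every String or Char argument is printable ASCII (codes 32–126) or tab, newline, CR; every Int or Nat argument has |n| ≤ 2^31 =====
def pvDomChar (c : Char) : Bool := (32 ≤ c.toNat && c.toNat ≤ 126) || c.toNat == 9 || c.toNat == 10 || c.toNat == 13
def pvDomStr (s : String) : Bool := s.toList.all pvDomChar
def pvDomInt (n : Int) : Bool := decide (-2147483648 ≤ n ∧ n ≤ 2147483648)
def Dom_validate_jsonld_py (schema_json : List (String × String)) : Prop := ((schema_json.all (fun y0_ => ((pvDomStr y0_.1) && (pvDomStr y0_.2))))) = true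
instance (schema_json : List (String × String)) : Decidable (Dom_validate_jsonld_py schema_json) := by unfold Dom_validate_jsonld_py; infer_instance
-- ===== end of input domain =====

-- B inverts the control flow: it builds a pending-issues dict keyed by field (worst case:
-- every required field and @context missing) and one sweep over the object's keys pops the
-- satisfied entries (objective: alternative; same cost).


-- ===== PORT A =====
def validate_jsonld_py (schema_json : List (String × String)) : List String :=
  let d := PySem.Dict.mk schema_json
  let issues : List String := []
  let schema_type := d.getD "@type" ""
  if schema_type = "" then
    issues ++ ["Missing @type field"]
  else
    let issues :=
      if schema_type = "Article" then
        (["headline", "datePublished"] : List String).foldl (fun issues field =>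
          if !d.contains field then
            issues ++ ["Article schema missing required field: " ++ field]
          else issues) issues
      else if schema_type = "FAQPage" then
        if !d.contains "mainEntity" then
          issues ++ ["FAQPage schema missing required field: mainEntity"]
        else issues
      else if schema_type = "BreadcrumbList" then
        if !d.contains "itemListElement" then
          issues ++ ["BreadcrumbList schema missing required field: itemListElement"]
        else issues
      else issues
    if !d.contains "@context" then
      issues ++ [schema_type ++ " schema missing @context field"]
    else issues

-- ===== PORT B =====
def pvRequired : PySem.Dict String (List String) :=
  PySem.Dict.mk
    [("Article", ["headline", "datePublished"]),
     ("FAQPage", ["mainEntity"]),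
     ("BreadcrumbList", ["itemListElement"])]

def validate_jsonld_py_alt (schema_json : List (String × String)) : List String :=
  let d := PySem.Dict.mk schema_json
  let schema_type := d.getD "@type" ""
  if schema_type = "" then ["Missing @type field"]
  else
    -- pessimistic pass: every issue the schema could have, keyed by field
    let pending : PySem.Dict String String :=
      (pvRequired.getD schema_type []).foldl
        (fun p field => p.insert field (schema_type ++ " schema missing required field: " ++ field))
        PySem.Dict.empty
    let pending := pending.insert "@context" (schema_type ++ " schema missing @context field")
    -- one sweep over the object's keys discharges the satisfied entries
    let pending := d.keys.foldl (fun p key => p.erase key) pending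
    pending.values

-- ===== PRECONDITION & SPEC =====
def Spec_validate_jsonld_py (schema_json : List (String × String)) (out : List String) : Prop := out = validate_jsonld_py_alt schema_json
instance (schema_json : List (String × String)) (out : List String) : Decidable (Spec_validate_jsonld_py schema_json out) := by unfold Spec_validate_jsonld_py; infer_instance

-- ===== CLAIM (what is proved, stated in full; the proofs are below) =====
def Claim_equal_validate_jsonld_py : Prop := ∀ (schema_json : List (String × String)), Dom_validate_jsonld_py schema_json → Spec_validate_jsonld_py schema_json (validate_jsonld_py schema_json)

-- ===== LEMMAS AND PROOFS =====

-- erasing every key of ks filters the items by "key not in ks"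
theorem pv_foldl_erase_items {κ ν : Type} [BEq κ] (ks : List κ) (p : PySem.Dict κ ν) :
    (ks.foldl (fun p k => p.erase k) p).items
      = p.items.filter (fun kv => !ks.contains kv.1) := by
  induction ks generalizing p with
  | nil => simp
  | cons k ks ih =>
      rw [List.foldl_cons, ih]
      show (List.filter _ (PySem.Dict.erase p k).items) = _
      simp only [PySem.Dict.erase, List.filter_filter]
      apply List.filter_congr
      intro kv _
      cases h1 : ks.contains kv.1 <;> cases h2 : kv.1 == k <;> simp [h1, h2]

-- ===== VERDICT (by name: the statement is the Claim_ definition above) =====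
theorem validate_jsonld_py_spec : Claim_equal_validate_jsonld_py := by
  intro s _
  unfold Spec_validate_jsonld_py validate_jsonld_py validate_jsonld_py_alt
  simp only
  set d := PySem.Dict.mk s with hd
  set t := d.getD "@type" "" with ht
  clear_value d
  by_cases h0 : t = ""
  · simp [h0]
  · rw [if_neg h0, if_neg h0]
    simp only [PySem.Dict.values, pv_foldl_erase_items]
    by_cases h1 : t = "Article"
    · rw [h1]
      by_cases hH : ("headline" ∈ d.keys) <;> by_cases hD : ("datePublished" ∈ d.keys) <;>
        by_cases hC : ("@context" ∈ d.keys) <;>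
        simp [pvRequired, PySem.Dict.getD, PySem.Dict.get?, PySem.Dict.insert,
              PySem.Dict.empty, PySem.Dict.contains_eq_decide_mem_keys, List.filter,
              hH, hD, hC]
    · by_cases h2 : t = "FAQPage"
      · rw [h2]
        by_cases hM : ("mainEntity" ∈ d.keys) <;> by_cases hC : ("@context" ∈ d.keys) <;>
          simp [pvRequired, PySem.Dict.getD, PySem.Dict.get?, PySem.Dict.insert,
                PySem.Dict.empty, PySem.Dict.contains_eq_decide_mem_keys, List.filter,
                hM, hC]
      · by_cases h3 : t = "BreadcrumbList"
        · rw [h3]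
          by_cases hI : ("itemListElement" ∈ d.keys) <;> by_cases hC : ("@context" ∈ d.keys) <;>
            simp [pvRequired, PySem.Dict.getD, PySem.Dict.get?, PySem.Dict.insert,
                  PySem.Dict.empty, PySem.Dict.contains_eq_decide_mem_keys, List.filter,
                  hI, hC]
        · rw [if_neg h1, if_neg h2, if_neg h3]
          have e1 : ("Article" == t) = false := beq_eq_false_iff_ne.mpr (fun h => h1 h.symm)
          have e2 : ("FAQPage" == t) = false := beq_eq_false_iff_ne.mpr (fun h => h2 h.symm)
          have e3 : ("BreadcrumbList" == t) = false := beq_eq_false_iff_ne.mpr (fun h => h3 h.symm)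
          have hnone : pvRequired.getD t [] = [] := by
            simp [pvRequired, PySem.Dict.getD, PySem.Dict.get?, List.find?, e1, e2, e3]
          by_cases hC : ("@context" ∈ d.keys) <;>
            simp [hnone, PySem.Dict.insert, PySem.Dict.empty,
                  PySem.Dict.contains_eq_decide_mem_keys, List.filter, hC]
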